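-- pv_equiv track=rewrite | github.com/koejdga/information-retrieval | scripts/PermutermIndex.py | create_permuterm_list
-- ===== SOURCE A (Python) =====
-- def create_permuterm_list(word: str):
--     result = []
--     with_dollar = word + '$'
--     result.append(with_dollar)
--
--     while with_dollar[0] != '$':
--         with_dollar = with_dollar[1:] + with_dollar[0]
--         result.append(with_dollar)
--
--     return result
-- ===== SOURCE B (Python) =====
-- def create_permuterm_list(word: str):
--     s = word + '$'
--     k = s.index('$')
--     return [s[i:] + s[:i] for i in range(k + 1)]
-- ===== Notes on version B (the rewrite author's own statement) =====
-- stated objective: simpler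
-- what changed: Replaces the stateful while-loop that repeatedly mutates a running rotated string with a direct slice-based comprehension: each rotation s[i:]+s[:i] is computed independently from the original string, up to the first index of the sentinel character.
import Mathlib
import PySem

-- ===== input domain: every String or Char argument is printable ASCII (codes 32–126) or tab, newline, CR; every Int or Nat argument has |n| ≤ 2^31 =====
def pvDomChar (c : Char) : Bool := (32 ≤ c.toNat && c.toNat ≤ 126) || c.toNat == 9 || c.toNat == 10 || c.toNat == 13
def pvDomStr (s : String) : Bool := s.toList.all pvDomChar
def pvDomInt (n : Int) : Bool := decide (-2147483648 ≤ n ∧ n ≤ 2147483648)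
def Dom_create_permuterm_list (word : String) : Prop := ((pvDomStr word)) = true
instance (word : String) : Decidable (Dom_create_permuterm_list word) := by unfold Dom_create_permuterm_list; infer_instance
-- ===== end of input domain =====

-- B computes each rotation directly by slice index up to the first '$', instead of
-- mutating a running rotated string in a while-loop (objective: simpler).


-- ===== PORT A =====
-- while with_dollar[0] != '$': with_dollar = with_dollar[1:] + with_dollar[0]; result.append(with_dollar)
-- Fuel = |with_dollar| suffices: the final '$' reaches the front within |with_dollar| - 1 rotations;
-- fuel only makes the recursion total, the computation is the loop's, step for step.
def pvRotLoopA : Nat → List Char → List (List Char) → List (List Char)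
  | 0, _, acc => acc
  | fuel + 1, wd, acc =>
    match wd with
    | [] => acc  -- unreachable: wd is always word ++ ['$'], nonempty
    | c :: rest =>
      if c ≠ '$' then pvRotLoopA fuel (rest ++ [c]) (acc ++ [rest ++ [c]])
      else acc

def create_permuterm_list (word : String) : List String :=
  let wd := word.toList ++ ['$']
  (pvRotLoopA wd.length wd [wd]).map String.ofList

-- ===== PORT B =====
def create_permuterm_list_alt (word : String) : List String :=
  let s := word.toList ++ ['$']
  let k := (PySem.List.index? s '$').getD 0   -- s.index('$'); '$' ∈ s, so never none
  (List.range (k + 1)).map (fun i => String.ofList (List.drop i s ++ List.take i s))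

-- ===== PRECONDITION & SPEC =====
def Spec_create_permuterm_list (word : String) (out : List String) : Prop := out = create_permuterm_list_alt word
instance (word : String) (out : List String) : Decidable (Spec_create_permuterm_list word out) := by unfold Spec_create_permuterm_list; infer_instance

-- ===== CLAIM (what is proved, stated in full; the proofs are below) =====
def Claim_equal_create_permuterm_list : Prop := ∀ (word : String), Dom_create_permuterm_list word → Spec_create_permuterm_list word (create_permuterm_list word)

-- ===== LEMMAS AND PROOFS =====

-- After i rotations the loop state is s.drop i ++ s.take i; the loop runs until i = k,
-- the first index of '$' in s, appending rotations i+1 … k.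
theorem pvRotLoopA_eq (s : List Char) (k : Nat) (hk : k < s.length)
    (hsk : s[k] = '$') (hlt : ∀ j (hj : j < k), s[j]'(by omega) ≠ '$') :
    ∀ fuel i acc, i ≤ k → k ≤ i + fuel →
      pvRotLoopA fuel (s.drop i ++ s.take i) acc
        = acc ++ (List.range' (i + 1) (k - i)).map (fun j => s.drop j ++ s.take j) := by
  intro fuel
  induction fuel with
  | zero =>
    intro i acc hik hfuel
    have : i = k := by omega
    simp [pvRotLoopA, this]
  | succ n ih =>
    intro i acc hik hfuel
    have hil : i < s.length := by omega
    have hdrop : s.drop i = s[i] :: s.drop (i + 1) := List.drop_eq_getElem_cons hil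
    have htake : s.take (i + 1) = s.take i ++ [s[i]] := by
      rw [List.take_add_one, List.getElem?_eq_getElem hil]
      rfl
    rcases Nat.lt_or_ge i k with hlt' | hge
    · have hne : s[i] ≠ '$' := hlt i hlt'
      have hstep : (s.drop (i + 1) ++ s.take i) ++ [s[i]]
          = s.drop (i + 1) ++ s.take (i + 1) := by
        rw [htake]; simp
      rw [hdrop]
      simp only [pvRotLoopA, List.cons_append, ne_eq, hne, not_false_eq_true, if_pos]
      rw [hstep, ih (i + 1) (acc ++ [s.drop (i + 1) ++ s.take (i + 1)]) (by omega) (by omega)]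
      have hrange : List.range' (i + 1) (k - i) = (i + 1) :: List.range' (i + 2) (k - (i + 1)) := by
        have : k - i = (k - (i + 1)) + 1 := by omega
        rw [this, List.range'_succ]
      rw [hrange]
      simp
    · have hieq : i = k := by omega
      subst hieq
      rw [hdrop]
      simp [pvRotLoopA, hsk]

-- ===== VERDICT (by name: the statement is the Claim_ definition above) =====
theorem create_permuterm_list_spec : Claim_equal_create_permuterm_list := by
  intro word _
  unfold Spec_create_permuterm_list create_permuterm_list create_permuterm_list_alt
  dsimp only
  have hmem : '$' ∈ word.toList ++ ['$'] := by simp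
  set s : List Char := word.toList ++ ['$'] with hs
  obtain ⟨k, hk⟩ : ∃ k, PySem.List.index? s '$' = some k :=
    Option.isSome_iff_exists.mp ((PySem.List.index?_isSome_iff s '$').mpr hmem)
  obtain ⟨hklen, hsk, hlt⟩ := PySem.List.getElem_of_index?_eq_some hk
  have h0 : s.drop 0 ++ s.take 0 = s := by simp
  have hloop := pvRotLoopA_eq s k hklen hsk hlt s.length 0 [s] (by omega) (by omega)
  rw [h0] at hloop
  rw [hloop, hk, Option.getD_some]
  have hrange : List.range (k + 1) = 0 :: List.range' 1 k := by
    rw [List.range_eq_range', List.range'_succ]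
  rw [hrange]
  simp
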